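-- pv_equiv track=rewrite | github.com/mwj0528/CodingTest_Python | 프로그래머스/0/120835. 진료 순서 정하기/진료 순서 정하기.py | solution
-- ===== SOURCE A (Python) =====
-- def solution(emergency):
--     sort_emergency = sorted(emergency, reverse = True)
--     answer = [0] * len(emergency)
--     for i in range(len(sort_emergency)):
--         order = i + 1
--         for j in range(len(emergency)):
--             if emergency[j] == sort_emergency[i]:
--                 answer[j] = order
--
--     return answer
-- ===== SOURCE B (Python) =====
-- def solution(emergency):
--     rank = {}
--     for i, v in enumerate(sorted(emergency, reverse=True)):
--         rank[v] = i + 1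
--     return [rank[v] for v in emergency]
-- ===== Notes on version B (the rewrite author's own statement) =====
-- stated objective: faster
-- what changed: Replaces the nested scan (for each sorted value, rescan the whole list) by one pass over the sorted list building a value-to-rank dict (later duplicates overwrite, giving the same max rank), then a single lookup pass.
import Mathlib
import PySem

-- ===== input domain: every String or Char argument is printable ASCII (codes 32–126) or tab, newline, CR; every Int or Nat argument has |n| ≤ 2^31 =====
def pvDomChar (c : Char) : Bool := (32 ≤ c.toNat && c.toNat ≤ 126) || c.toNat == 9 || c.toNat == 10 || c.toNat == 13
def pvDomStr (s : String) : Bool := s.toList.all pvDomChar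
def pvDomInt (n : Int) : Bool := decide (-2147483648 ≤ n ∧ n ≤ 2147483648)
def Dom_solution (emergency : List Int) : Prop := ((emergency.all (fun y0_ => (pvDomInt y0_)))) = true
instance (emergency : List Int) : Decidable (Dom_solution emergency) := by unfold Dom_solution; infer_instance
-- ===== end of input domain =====

-- B replaces A's quadratic nested scan by sort + value→rank dict + one lookup pass (faster, asymptotic).

-- ===== PORT A =====
def solution (emergency : List Int) : List Int :=
  let sortE := PySem.List.sorted emergency (fun x => x) true
  let answer := List.replicate emergency.length (0 : Int)
  (PySem.List.pyRange 0 (sortE.length : Int) 1).foldl (fun ans i =>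
    let order := i + 1
    (PySem.List.pyRange 0 (emergency.length : Int) 1).foldl (fun a j =>
      -- emergency[j], sort_emergency[i]: indices from range are in range, so the
      -- defaulted read pyGetD is exact here
      if PySem.List.pyGetD emergency j 0 = PySem.List.pyGetD sortE i 0 then
        PySem.List.pySetD a j order   -- answer[j] = order (j in range)
      else a) ans) answer

-- ===== PORT B =====
def solution_alt (emergency : List Int) : List Int :=
  let rank := (PySem.List.enumerate (PySem.List.sorted emergency (fun x => x) true) 0).foldl
      (fun d p => d.insert p.2 (p.1 + 1)) PySem.Dict.empty
  -- rank[v]: every v of emergency is a key of rank (it occurs in the sorted list),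
  -- so Python's rank[v] never raises; getD's default 0 is unreachable
  emergency.map (fun v => rank.getD v 0)

-- ===== PRECONDITION & SPEC =====
def Spec_solution (emergency : List Int) (out : List Int) : Prop := out = solution_alt emergency
instance (emergency : List Int) (out : List Int) : Decidable (Spec_solution emergency out) := by unfold Spec_solution; infer_instance

-- ===== CLAIM (what is proved, stated in full; the proofs are below) =====
def Claim_equal_solution : Prop := ∀ (emergency : List Int), Dom_solution emergency → Spec_solution emergency (solution emergency)

-- ===== LEMMAS AND PROOFS =====

-- "last rank" of v in S: 1 + last index of v (0 if absent)
def lastRank (v : Int) (S : List Int) : Int :=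
  (PySem.List.enumerate S 0).foldl (fun acc p => if p.2 = v then p.1 + 1 else acc) 0

-- B's dict lookup computes lastRank
lemma dict_getD_eq (S : List Int) (s : Int) (d : PySem.Dict Int Int) (v : Int) :
    ((PySem.List.enumerate S s).foldl (fun d p => d.insert p.2 (p.1 + 1)) d).getD v 0
      = (PySem.List.enumerate S s).foldl (fun acc p => if p.2 = v then p.1 + 1 else acc) (d.getD v 0) := by
  induction S generalizing s d with
  | nil => simp [PySem.List.enumerate_nil]
  | cons x T ih =>
      rw [PySem.List.enumerate_cons]
      simp only [List.foldl_cons, ih]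
      congr 1
      rw [PySem.Dict.getD_insert]
      by_cases h : x = v
      · simp [h]
      · simp [h, Ne.symm h]

lemma lastRank_eq_dict (S : List Int) (v : Int) :
    ((PySem.List.enumerate S 0).foldl (fun d p => d.insert p.2 (p.1 + 1)) PySem.Dict.empty).getD v 0
      = lastRank v S := by
  rw [dict_getD_eq, PySem.Dict.getD_empty, lastRank]

lemma lastRank_append (v : Int) (T : List Int) (x : Int) :
    lastRank v (T ++ [x]) = if x = v then (T.length : Int) + 1 else lastRank v T := by
  unfold lastRank
  rw [PySem.List.enumerate_append, List.foldl_append]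
  simp [PySem.List.enumerate_cons]

-- inner loop of A, pointwise: every in-range position whose pair occurs with value s gets order
lemma inner_getElem? (L : List (Int × Int)) (s order : Int) (a : List Int) (k : Nat)
    (hL : ∀ p ∈ L, 0 ≤ p.1) :
    (L.foldl (fun a p => if p.2 = s then PySem.List.pySetD a p.1 order else a) a)[k]?
      = if (∃ p ∈ L, p.1 = (k : Int) ∧ p.2 = s) ∧ k < a.length then some order else a[k]? := by
  induction L generalizing a with
  | nil => simp
  | cons q T ih =>
      have hq : 0 ≤ q.1 := hL q (List.mem_cons_self)
      have hT : ∀ p ∈ T, 0 ≤ p.1 := fun p hp => hL p (List.mem_cons_of_mem _ hp)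
      simp only [List.foldl_cons]
      rw [ih _ hT]
      by_cases hs : q.2 = s
      · rw [if_pos hs, PySem.List.length_pySetD, PySem.List.pySetD_of_nonneg _ _ hq]
        by_cases hk1 : q.1 = (k : Int)
        · have hkt : q.1.toNat = k := by omega
          by_cases hlen : k < a.length
          · by_cases hmem : (∃ p ∈ T, p.1 = (k : Int) ∧ p.2 = s)
            · rw [if_pos ⟨hmem, hlen⟩, if_pos ⟨⟨q, List.mem_cons_self, hk1, hs⟩, hlen⟩]
            · rw [if_neg (fun h => hmem h.1), hkt, List.getElem?_set_self (by omega),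
                if_pos ⟨⟨q, List.mem_cons_self, hk1, hs⟩, hlen⟩]
          · rw [if_neg (fun h => hlen h.2), if_neg (fun h => hlen h.2), hkt,
              List.getElem?_set]
            simp [hlen]
        · have hne : q.1.toNat ≠ k := by omega
          rw [List.getElem?_set_ne hne]
          by_cases hmem : (∃ p ∈ T, p.1 = (k : Int) ∧ p.2 = s) ∧ k < a.length
          · rw [if_pos hmem, if_pos ⟨⟨hmem.1.choose, List.mem_cons_of_mem _ hmem.1.choose_spec.1,
              hmem.1.choose_spec.2⟩, hmem.2⟩]
          · rw [if_neg hmem, if_neg (by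
              rintro ⟨⟨p, hp, h1, h2⟩, hlen⟩
              rcases List.mem_cons.mp hp with rfl | hp'
              · exact hne (by omega)
              · exact hmem ⟨⟨p, hp', h1, h2⟩, hlen⟩)]
      · rw [if_neg hs]
        congr 1
        simp only [eq_iff_iff]
        constructor
        · rintro ⟨⟨p, hp, h1, h2⟩, hlen⟩
          exact ⟨⟨p, List.mem_cons_of_mem _ hp, h1, h2⟩, hlen⟩
        · rintro ⟨⟨p, hp, h1, h2⟩, hlen⟩
          rcases List.mem_cons.mp hp with rfl | hp'
          · exact absurd h2 hs
          · exact ⟨⟨p, hp', h1, h2⟩, hlen⟩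

-- specialize the inner loop to L = enumerate xs 0 and a = xs.map F
lemma inner_map (xs : List Int) (s order : Int) (F : Int → Int) :
    (PySem.List.enumerate xs 0).foldl
        (fun a p => if p.2 = s then PySem.List.pySetD a p.1 order else a) (xs.map F)
      = xs.map (fun v => if v = s then order else F v) := by
  apply List.ext_getElem?
  intro k
  have hlen : ∀ p ∈ PySem.List.enumerate xs (0 : Int), 0 ≤ p.1 := by
    intro p hp
    rcases (PySem.List.mem_enumerate_iff _ _ _).mp hp with ⟨j, hj, rfl⟩
    omega
  rw [inner_getElem? _ _ _ _ _ hlen]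
  by_cases hk : k < xs.length
  · have hmem : (∃ p ∈ PySem.List.enumerate xs (0 : Int), p.1 = (k : Int) ∧ p.2 = s)
        ↔ xs[k] = s := by
      constructor
      · rintro ⟨p, hp, h1, h2⟩
        rcases (PySem.List.mem_enumerate_iff _ _ _).mp hp with ⟨j, hj, rfl⟩
        simp only [zero_add] at h1
        have : j = k := by exact_mod_cast h1
        subst this; exact h2
      · intro h
        exact ⟨((k : Int), xs[k]),
          (PySem.List.mem_enumerate_iff _ _ _).mpr ⟨k, hk, by simp⟩, rfl, h⟩
    by_cases hs : xs[k] = s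
    · rw [if_pos ⟨hmem.mpr hs, by simpa using hk⟩]
      rw [List.getElem?_map, List.getElem?_eq_getElem hk]
      simp [hs]
    · rw [if_neg (by
        rintro ⟨h1, _⟩
        exact hs (hmem.mp h1))]
      simp [List.getElem?_map, List.getElem?_eq_getElem hk, hs]
  · rw [if_neg (by rintro ⟨_, h⟩; simp at h; omega)]
    simp only [List.getElem?_map]
    rw [List.getElem?_eq_none (show xs.length ≤ k by omega)]
    simp

-- A's outer loop over any prefix list S produces the lastRank map
lemma outer_fold (xs : List Int) (S : List Int) :
    (PySem.List.enumerate S 0).foldl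
        (fun ans q => (PySem.List.enumerate xs 0).foldl
          (fun a p => if p.2 = q.2 then PySem.List.pySetD a p.1 (q.1 + 1) else a) ans)
        (List.replicate xs.length (0 : Int))
      = xs.map (fun v => lastRank v S) := by
  induction S using List.reverseRecOn with
  | nil =>
      simp [PySem.List.enumerate_nil, lastRank, List.map_const']
  | append_singleton T x ih =>
      rw [PySem.List.enumerate_append, List.foldl_append, ih]
      simp only [PySem.List.enumerate_cons, PySem.List.enumerate_nil, List.foldl_cons,
        List.foldl_nil, zero_add]
      rw [inner_map]
      apply List.map_congr_left
      intro v _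
      rw [lastRank_append]
      by_cases h : x = v
      · simp [h]
      · simp [h, Ne.symm h]

-- rewrite A's pyRange loops as enumerate loops (the body reads only i, xs[i] / j, xs[j])
lemma solution_eq_enumerate_fold (emergency : List Int) :
    solution emergency
      = (PySem.List.enumerate (PySem.List.sorted emergency (fun x => x) true) 0).foldl
          (fun ans q => (PySem.List.enumerate emergency 0).foldl
            (fun a p => if p.2 = q.2 then PySem.List.pySetD a p.1 (q.1 + 1) else a) ans)
          (List.replicate emergency.length (0 : Int)) := by
  unfold solution
  simp only [PySem.List.enumerate_eq_map_pyRange _ (0 : Int), List.foldl_map, PySem.List.len]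

-- ===== VERDICT (by name: the statement is the Claim_ definition above) =====
theorem solution_spec : Claim_equal_solution := by
  intro emergency _
  unfold Spec_solution solution_alt
  rw [solution_eq_enumerate_fold, outer_fold]
  simp only []
  apply List.map_congr_left
  intro v _
  rw [lastRank_eq_dict]
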